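-- pv_equiv track=rewrite | github.com/gka0903/Coding_Test | 문제/단어 변환.py | groupSetByRule
-- ===== SOURCE A (Python) =====
-- def check_different(w1, w2):
--     count = 0
--
--     for i in range(len(w1)):
--         if w1[i] == w2[i]:
--             count += 1
--
--     return len(w1) - count
--
-- def groupSetByRule(words):
--     group = {}
--
--     for i in range(len(words)):
--         word = words[i]
--
--         for w in words:
--             if word == w:
--                 continue
--
--             if check_different(word, w) == 1:
--                 group.setdefault(word, set()).add(w)
--
--     return group
-- ===== SOURCE B (Python) =====
-- def groupSetByRule(words):
--     # The grouping is only meaningful for words of one common length (A's pairwise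
--     # scan indexes the shorter word out of range otherwise), so validate up front.
--     if len({len(w) for w in words}) > 1:
--         raise ValueError("words must all have the same length")
--
--     # Bucket words by (position, word-with-that-position-deleted): two equal-length
--     # words share a bucket key iff they agree everywhere except (possibly) at that
--     # position, so each word's neighbours at Hamming distance 1 are exactly the
--     # other words found in its buckets.
--     buckets = {}
--     for w in words:
--         for i in range(len(w)):
--             buckets.setdefault((i, w[:i] + w[i + 1:]), {})[w] = None
--
--     # adj[u] = insertion-ordered set (dict of None) of words at distance 1 from u,
--     # in order of first appearance in `words`.
--     adj = {}
--     for w in words: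
--         for i in range(len(w)):
--             for u in buckets[(i, w[:i] + w[i + 1:])]:
--                 if u != w:
--                     adj.setdefault(u, {})[w] = None
--
--     # Emit groups keyed in first-appearance order of the words themselves.
--     result = {}
--     for w in words:
--         if w in adj and w not in result:
--             result[w] = set(adj[w])
--     return result
-- ===== Notes on version B (the rewrite author's own statement) =====
-- stated objective: faster
-- what changed: Replaces A's all-pairs Hamming-distance scan by bucketing each word under (position, word with that position deleted) keys, so distance-1 neighbours are read off shared buckets instead of being rescanned per pair; B validates the common word length up front where A would raise IndexError mid-scan.
import Mathlib
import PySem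

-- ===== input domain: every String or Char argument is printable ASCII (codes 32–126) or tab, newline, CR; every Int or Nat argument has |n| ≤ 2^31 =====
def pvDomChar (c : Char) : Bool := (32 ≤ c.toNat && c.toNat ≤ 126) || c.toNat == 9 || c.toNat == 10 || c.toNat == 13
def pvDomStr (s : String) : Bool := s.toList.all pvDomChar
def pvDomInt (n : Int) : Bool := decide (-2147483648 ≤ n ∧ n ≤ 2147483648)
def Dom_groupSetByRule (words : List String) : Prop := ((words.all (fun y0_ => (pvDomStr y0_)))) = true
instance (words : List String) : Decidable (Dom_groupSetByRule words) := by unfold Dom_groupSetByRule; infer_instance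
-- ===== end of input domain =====

-- B replaces A's all-pairs scan by bucketing each word under (position, word with that
-- position deleted), so words at Hamming distance 1 are read off shared buckets (objective: faster).

-- ===== PORT A =====
-- 'if w1[i] == w2[i]' raises IndexError when len(w2) < len(w1); the port's Option comparison
-- is exact whenever i is in range for both strings, which Pre_ (equal lengths) guarantees.
def check_different (w1 w2 : String) : Int :=
  let count : Int :=
    (PySem.List.pyRange 0 (PySem.Str.len w1)).foldl
      (fun count i =>
        if PySem.Str.pyGet? w1 i == PySem.Str.pyGet? w2 i then count + 1 else count) 0
  PySem.Str.len w1 - count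

-- 'for i in range(len(words)): word = words[i]' visits exactly the elements of words in order,
-- so the outer loop is a fold over words; 'group.setdefault(word, set()).add(w)' stores the
-- grown set back under word (setdefault inserts an empty set if absent; overwrite keeps position).
def groupSetByRule (words : List String) : List (String × List String) :=
  let group : PySem.Dict String (PySem.Set String) :=
    words.foldl (fun group word =>
      words.foldl (fun group w =>
        if word == w then group
        else if check_different word w == 1 then
          group.insert word (PySem.Set.add (group.getD word PySem.Set.empty) w)
        else group)
        group)
      PySem.Dict.empty
  group.items

-- ===== PORT B =====
-- pvDelKey w i ports the bucket key '(i, w[:i] + w[i+1:])' of Source B.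
def pvDelKey (w : String) (i : Int) : Int × String :=
  (i, String.ofList (PySem.List.slice w.toList none (some i) ++
                 PySem.List.slice w.toList (some (i + 1)) none))

-- Source B's up-front length validation raises exactly where A raises; those inputs lie outside
-- Pre_, so the port omits the raise and simply proceeds (nothing is claimed there).
-- Source B's inner dicts-used-as-ordered-sets are PySem.Dict _ Unit; 'for u in buckets[k]'
-- iterates that dict's keys in insertion order (.keys); 'buckets[(i, …)]' in the second
-- pass never raises (w itself was bucketed in the first pass), so getD is exact there.
def groupSetByRule_alt (words : List String) : List (String × List String) :=
  let buckets : PySem.Dict (Int × String) (PySem.Dict String Unit) :=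
    words.foldl (fun buckets w =>
      (PySem.List.pyRange 0 (PySem.Str.len w)).foldl (fun buckets i =>
        buckets.insert (pvDelKey w i)
          ((buckets.getD (pvDelKey w i) PySem.Dict.empty).insert w ()))
        buckets)
      PySem.Dict.empty
  let adj : PySem.Dict String (PySem.Dict String Unit) :=
    words.foldl (fun adj w =>
      (PySem.List.pyRange 0 (PySem.Str.len w)).foldl (fun adj i =>
        ((buckets.getD (pvDelKey w i) PySem.Dict.empty).keys).foldl (fun adj u =>
          if u == w then adj
          else adj.insert u ((adj.getD u PySem.Dict.empty).insert w ()))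
          adj)
        adj)
      PySem.Dict.empty
  let result : PySem.Dict String (PySem.Set String) :=
    words.foldl (fun result w =>
      if adj.contains w && !(result.contains w) then
        result.insert w (PySem.Set.ofList ((adj.getD w PySem.Dict.empty).keys))
      else result)
      PySem.Dict.empty
  result.items

-- ===== PRECONDITION & SPEC =====
-- Pre_ excludes exactly the inputs on which A raises IndexError: whenever two words of
-- different lengths are both present, check_different word w reads w[i] past w's end.
def Pre_groupSetByRule (words : List String) : Prop :=
  ∀ u ∈ words, ∀ v ∈ words, PySem.Str.len u = PySem.Str.len v
instance (words : List String) : Decidable (Pre_groupSetByRule words) := by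
  unfold Pre_groupSetByRule; infer_instance

def pvWitness_groupSetByRule : List String := ["hot", "dot", "dog", "lot"]

def Spec_groupSetByRule (words : List String) (out : List (String × List String)) : Prop :=
  out = groupSetByRule_alt words
instance (words : List String) (out : List (String × List String)) :
    Decidable (Spec_groupSetByRule words out) := by unfold Spec_groupSetByRule; infer_instance

-- ===== CLAIM (what is proved, stated in full; the proofs are below) =====
def Claim_equal_groupSetByRule : Prop :=
  ∀ (words : List String), Dom_groupSetByRule words → Pre_groupSetByRule words →
    Spec_groupSetByRule words (groupSetByRule words)

-- ===== LEMMAS AND PROOFS =====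

-- The common canonical form both ports are reduced to: scan words in order, giving each word u
-- with a nonempty neighbour list NN u the entry (u, set of NN u).
def pvCanon (NN : String → List String) (words : List String) :
    PySem.Dict String (PySem.Set String) :=
  words.foldl (fun g u => if NN u = [] then g else g.insert u (PySem.Set.ofList (NN u)))
    PySem.Dict.empty

-- A's notion of "neighbour of u": the qualifying w, scanned over all of words.
def pvQA (u w : String) : Bool := !(u == w) && (check_different u w == 1)

-- Generic: two folds agree when their steps agree on all states satisfying an invariant.
theorem pv_foldl_inv_congr {α σ : Type} (P : σ → Prop) (f g : σ → α → σ) :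
    ∀ (l : List α) (s : σ), P s → (∀ s a, a ∈ l → P s → f s a = g s a) →
      (∀ s a, a ∈ l → P s → P (g s a)) → l.foldl f s = l.foldl g s := by
  intro l
  induction l with
  | nil => intros; rfl
  | cons a t ih =>
    intro s hs h1 h2
    simp only [List.foldl_cons]
    rw [h1 s a (by simp) hs]
    exact ih (g s a) (h2 s a (by simp) hs)
      (fun s b hb => h1 s b (by simp [hb])) (fun s b hb => h2 s b (by simp [hb]))

theorem pv_flatMap_ite_singleton {α : Type} (c : α → Bool) :
    ∀ l : List α, l.flatMap (fun a => if c a then [a] else []) = l.filter c := by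
  intro l
  induction l with
  | nil => rfl
  | cons a t ih =>
    simp only [List.flatMap_cons, List.filter_cons, ih]
    by_cases h : c a = true <;> simp [h]

theorem pv_singleton_of_nodup {α : Type} (l : List α) (i : α) (hnd : l.Nodup)
    (hm : i ∈ l) (hall : ∀ x ∈ l, x = i) : l = [i] := by
  cases l with
  | nil => cases hm
  | cons a t =>
    have ha : a = i := hall a (by simp)
    have ht : t = [] := by
      rw [List.eq_nil_iff_forall_not_mem]
      intro x hx
      have hx' : x = i := hall x (by simp [hx])
      subst hx' ha
      exact (List.nodup_cons.1 hnd).1 hx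
    simp [ha, ht]

theorem pv_flatMap_if_unique {α β : Type} (c : α → Bool) (y : β) :
    ∀ l : List α, l.Nodup → (∀ a ∈ l, ∀ b ∈ l, c a = true → c b = true → a = b) →
      l.flatMap (fun a => if c a then [y] else []) = if l.any c then [y] else [] := by
  intro l
  induction l with
  | nil => simp
  | cons a t ih =>
    intro hnd huniq
    simp only [List.flatMap_cons, List.any_cons]
    by_cases ha : c a = true
    · have ht : ∀ b ∈ t, c b = false := by
        intro b hb
        by_contra hcb
        have : a = b := huniq a (by simp) b (by simp [hb]) ha (by simpa using hcb)
        exact (List.nodup_cons.1 hnd).1 (this ▸ hb)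
      have : t.flatMap (fun a => if c a then [y] else []) = [] := by
        apply List.flatMap_eq_nil_iff.2
        intro b hb; simp [ht b hb]
      simp [ha, this]
    · have : (if c a then [y] else []) = [] := by simp [ha]
      rw [this, List.nil_append, ih (List.nodup_cons.1 hnd).2
        (fun x hx y' hy' => huniq x (by simp [hx]) y' (by simp [hy']))]
      simp [Bool.eq_false_iff.1 (by simpa using ha)]

theorem pv_add_of_mem {α : Type} [BEq α] [LawfulBEq α] (s : PySem.Set α) (a : α)
    (h : a ∈ s) : PySem.Set.add s a = s := by
  unfold PySem.Set.add
  rw [if_pos ((PySem.Set.contains_iff s a).2 h)]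

theorem pv_update_of_subset {α : Type} [BEq α] [LawfulBEq α] :
    ∀ (l : List α) (s : PySem.Set α), (∀ x ∈ l, x ∈ s) → PySem.Set.update s l = s := by
  intro l
  induction l with
  | nil => intros; rfl
  | cons a t ih =>
    intro s hsub
    have h1 : PySem.Set.add s a = s := pv_add_of_mem s a (hsub a (by simp))
    show List.foldl PySem.Set.add s (a :: t) = s
    rw [List.foldl_cons, h1]
    exact ih s (fun x hx => hsub x (by simp [hx]))

theorem pv_foldl_add_append {α : Type} [BEq α] [LawfulBEq α] :
    ∀ (l : List α) (s : PySem.Set α), (s ++ l).Nodup → l.foldl PySem.Set.add s = s ++ l := by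
  intro l
  induction l with
  | nil => intro s _; simp
  | cons a t ih =>
    intro s hnd
    have hrearr : s ++ a :: t = (s ++ [a]) ++ t := by simp
    have hnd' : ((s ++ [a]) ++ t).Nodup := hrearr ▸ hnd
    have hna : a ∉ s := by
      intro hmem
      have : ¬ (s ++ a :: t).Nodup := by
        intro hn
        exact (List.disjoint_of_nodup_append hn) hmem (by simp)
      exact this hnd
    have hadd : PySem.Set.add s a = s ++ [a] := by
      unfold PySem.Set.add
      rw [if_neg]
      intro hc
      exact hna ((PySem.Set.contains_iff s a).1 hc)
    rw [List.foldl_cons, hadd, ih (s ++ [a]) hnd', hrearr]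

theorem pv_ofList_nodup {α : Type} [BEq α] [LawfulBEq α] (l : List α) (h : l.Nodup) :
    PySem.Set.ofList l = l := by
  rw [PySem.Set.ofList_eq_foldl, pv_foldl_add_append l [] (by simpa using h)]
  simp

theorem pv_insert_eq_self {κ ν : Type} [BEq κ] [LawfulBEq κ] (d : PySem.Dict κ ν) (k : κ) (v : ν)
    (hnd : d.keys.Nodup) (h : d.get? k = some v) : d.insert k v = d := by
  apply PySem.Dict.ext
  rw [PySem.Dict.items_insert_of_contains d v
    (by rw [PySem.Dict.contains_eq_isSome_get?, h]; rfl)]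
  conv_rhs => rw [← List.map_id d.items]
  apply List.map_congr_left
  intro p hp
  by_cases hpk : (p.1 == k) = true
  · have hk : p.1 = k := eq_of_beq hpk
    have hget : d.get? p.1 = some p.2 := PySem.Dict.get?_of_mem_items d (by simpa using hp) hnd
    rw [hk] at hget
    rw [h] at hget
    have : v = p.2 := by injection hget
    simp [hk.symm, this]
  · simp [hpk]

-- invariant carried through the canonical fold
def pvP (NN : String → List String) (g : PySem.Dict String (PySem.Set String)) : Prop :=
  g.keys.Nodup ∧ ∀ u s, g.get? u = some s → s = PySem.Set.ofList (NN u)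

theorem pv_canonstep_preserves (NN : String → List String)
    (g : PySem.Dict String (PySem.Set String)) (a : String) (h : pvP NN g) :
    pvP NN (if NN a = [] then g else g.insert a (PySem.Set.ofList (NN a))) := by
  split_ifs with hna
  · exact h
  · refine ⟨PySem.Dict.nodup_keys_insert g a _ h.1, ?_⟩
    intro u s hget
    rw [PySem.Dict.get?_insert] at hget
    split_ifs at hget with hu
    · subst hu; injection hget with hv; exact hv.symm
    · exact h.2 u s hget

-- A's inner loop over l grows word's set by exactly l.filter (pvQA word).
theorem pv_A_inner (word : String) :
    ∀ (l : List String) (g : PySem.Dict String (PySem.Set String)),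
    l.foldl (fun group w =>
        if word == w then group
        else if check_different word w == 1 then
          group.insert word (PySem.Set.add (group.getD word PySem.Set.empty) w)
        else group) g
    = if l.filter (pvQA word) = [] then g
      else g.insert word
        (PySem.Set.update (g.getD word PySem.Set.empty) (l.filter (pvQA word))) := by
  intro l
  induction l with
  | nil => intro g; simp
  | cons w t ih =>
    intro g
    simp only [List.foldl_cons, List.filter_cons]
    cases hww : (word == w) with
    | true =>
      have h2 : pvQA word w = false := by simp [pvQA, hww]
      rw [h2]
      simp only [Bool.false_eq_true, reduceIte]
      exact ih g
    | false =>
      cases hc : (check_different word w == 1) with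
      | false =>
        have h2 : pvQA word w = false := by simp [pvQA, hww, hc]
        rw [h2]
        simp only [Bool.false_eq_true, reduceIte]
        exact ih g
      | true =>
        have h2 : pvQA word w = true := by simp [pvQA, hww, hc]
        rw [h2]
        simp only [Bool.false_eq_true, reduceIte]
        rw [ih]
        have hupd : ∀ (s : PySem.Set String) (r : List String),
            PySem.Set.update s (w :: r) = PySem.Set.update (PySem.Set.add s w) r := by
          intro s r; rfl
        by_cases ht : t.filter (pvQA word) = []
        · rw [if_pos ht, if_neg (by simp), ht, hupd]
          rfl
        · rw [if_neg ht, if_neg (by simp)]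
          rw [PySem.Dict.getD_insert_self, PySem.Dict.insert_insert_self, hupd]

theorem pv_A_eq_canon_aux (words : List String) :
    groupSetByRule words
      = (pvCanon (fun u => words.filter (pvQA u)) words).items := by
  unfold groupSetByRule pvCanon
  dsimp only
  congr 1
  have hstep : (fun (group : PySem.Dict String (PySem.Set String)) (word : String) =>
      words.foldl (fun group w =>
        if word == w then group
        else if check_different word w == 1 then
          group.insert word (PySem.Set.add (group.getD word PySem.Set.empty) w)
        else group) group)
      = (fun g word => if words.filter (pvQA word) = [] then g
          else g.insert word
            (PySem.Set.update (g.getD word PySem.Set.empty) (words.filter (pvQA word)))) := by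
    funext g word
    exact pv_A_inner word words g
  rw [hstep]
  apply pv_foldl_inv_congr (pvP (fun u => words.filter (pvQA u)))
  · exact ⟨by simp [PySem.Dict.keys_empty], fun u s h => by simp [PySem.Dict.get?_empty] at h⟩
  · intro g word _ hP
    by_cases hna : words.filter (pvQA word) = []
    · simp [hna]
    · rw [if_neg hna, if_neg hna]
      cases hget : g.get? word with
      | none =>
        rw [PySem.Dict.getD_of_get?_eq_none g _ hget, PySem.Set.ofList_eq_foldl]
        rfl
      | some s =>
        have hs : s = PySem.Set.ofList (words.filter (pvQA word)) := hP.2 word s hget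
        rw [PySem.Dict.getD_of_get?_eq_some g _ hget]
        rw [pv_update_of_subset _ s (by
          intro x hx
          rw [hs]
          exact (PySem.Set.mem_ofList _ x).2 hx), hs]
  · intro g word _ hP
    exact pv_canonstep_preserves _ g word hP

-- B's notion: w shares a deletion bucket key with u.
def pvPats (w : String) : List (Int × String) :=
  (PySem.List.pyRange 0 (PySem.Str.len w)).map (pvDelKey w)

def pvQB (u w : String) : Bool := !(u == w) && (pvPats w).any (fun p => decide (p ∈ pvPats u))

theorem pv_A_eq_canon (words : List String) :
    groupSetByRule words = (pvCanon (fun u => words.filter (pvQA u)) words).items :=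
  pv_A_eq_canon_aux words

-- ---- character-level core: deleting position i, agreement off one position ----

def pvAgreeOff (cs ds : List Char) (i : Nat) : Prop :=
  ∀ j, j < cs.length → j ≠ i → cs[j]? = ds[j]?

theorem pv_del_eq_iff (cs ds : List Char) (h : cs.length = ds.length) (i : Nat)
    (hi : i < cs.length) :
    (cs.take i ++ cs.drop (i+1) = ds.take i ++ ds.drop (i+1)) ↔ pvAgreeOff cs ds i := by
  constructor
  · intro he j hj hne
    have hlt : (cs.take i).length = (ds.take i).length := by
      simp only [List.length_take]; omega
    obtain ⟨h1, h2⟩ := List.append_inj he hlt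
    rcases Nat.lt_or_ge j i with hji | hji
    · have := congrArg (fun l => l[j]?) h1
      simpa [List.getElem?_take, hji] using this
    · have hji' : i < j := lt_of_le_of_ne hji (Ne.symm hne)
      have := congrArg (fun l => l[(j - (i+1))]?) h2
      simp only [List.getElem?_drop] at this
      have harith : i + 1 + (j - (i+1)) = j := by omega
      rwa [harith] at this
  · intro ha
    have h1 : cs.take i = ds.take i := by
      apply List.ext_getElem?
      intro k
      rw [List.getElem?_take, List.getElem?_take]
      split_ifs with hk
      · exact ha k (by omega) (by omega)
      · rfl
    have h2 : cs.drop (i+1) = ds.drop (i+1) := by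
      apply List.ext_getElem?
      intro k
      rw [List.getElem?_drop, List.getElem?_drop]
      by_cases hk : i + 1 + k < cs.length
      · exact ha _ hk (by omega)
      · rw [List.getElem?_eq_none (by omega), List.getElem?_eq_none (by omega)]
    rw [h1, h2]

theorem pv_agree_two (cs ds : List Char) (h : cs.length = ds.length) (i i' : Nat)
    (hne : i ≠ i') (h1 : pvAgreeOff cs ds i) (h2 : pvAgreeOff cs ds i') : cs = ds := by
  apply List.ext_getElem?
  intro j
  by_cases hj : j < cs.length
  · by_cases hji : j = i
    · exact h2 j hj (hji ▸ hne)
    · exact h1 j hj hji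
  · rw [List.getElem?_eq_none (by omega), List.getElem?_eq_none (by omega)]

theorem pv_delKey_natCast (w : String) (k : Nat) :
    pvDelKey w (k : Int)
      = ((k : Int), String.ofList (w.toList.take k ++ w.toList.drop (k+1))) := by
  unfold pvDelKey
  rw [PySem.List.slice_to _ (Int.natCast_nonneg k),
      show ((k : Int) + 1) = ((k + 1 : Nat) : Int) by push_cast; ring,
      PySem.List.slice_from _ (Int.natCast_nonneg (k+1))]
  simp

theorem pv_mem_pats (w : String) (p : Int × String) :
    p ∈ pvPats w ↔ ∃ k : Nat, k < w.toList.length ∧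
      p = ((k : Int), String.ofList (w.toList.take k ++ w.toList.drop (k+1))) := by
  unfold pvPats
  rw [PySem.Str.len_eq, PySem.List.pyRange_zero_natCast, List.map_map]
  simp only [List.mem_map, List.mem_range, Function.comp]
  constructor
  · rintro ⟨k, hk, rfl⟩
    exact ⟨k, hk, pv_delKey_natCast w k⟩
  · rintro ⟨k, hk, rfl⟩
    exact ⟨k, hk, pv_delKey_natCast w k⟩

theorem pv_nodup_pats (w : String) : (pvPats w).Nodup := by
  unfold pvPats
  rw [PySem.Str.len_eq, PySem.List.pyRange_zero_natCast, List.map_map]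
  refine List.Nodup.map ?_ List.nodup_range
  intro a b hab
  have h1 := congrArg Prod.fst hab
  simp only [Function.comp, pvDelKey] at h1
  exact_mod_cast h1

-- ---- A's distance test as a statement about positions ----

theorem pv_check_eq_count (u w : String) :
    check_different u w
      = (u.toList.length : Int)
        - (List.countP (fun j => u.toList[j]? == w.toList[j]?) (List.range u.toList.length) : Nat) := by
  unfold check_different
  rw [PySem.Str.len_eq, PySem.List.pyRange_zero_natCast, List.foldl_map]
  simp only [PySem.Str.pyGet?_natCast]
  rw [PySem.List.foldl_if_add_one (fun k => u.toList[k]? == w.toList[k]?)]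
  simp

theorem pv_checkdiff_one_iff (u w : String) (h : u.toList.length = w.toList.length)
    (hne : u ≠ w) :
    (check_different u w = 1) ↔ ∃ i : Nat, i < u.toList.length ∧ pvAgreeOff u.toList w.toList i := by
  set n := u.toList.length with hn
  set pEq : Nat → Bool := fun j => u.toList[j]? == w.toList[j]? with hpEq
  set pNe : Nat → Bool := fun j => !(pEq j) with hpNe
  have hcount : check_different u w = (n : Int) - (List.countP pEq (List.range n) : Nat) :=
    pv_check_eq_count u w
  have hsplit : n = List.countP pEq (List.range n) + List.countP pNe (List.range n) := by
    have := List.length_eq_countP_add_countP (p := pEq) (l := List.range n)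
    simpa using this
  rw [hcount]
  constructor
  · intro hck
    have h1 : List.countP pNe (List.range n) = 1 := by omega
    obtain ⟨i, hfil⟩ := List.length_eq_one_iff.1 (by
      rw [← List.countP_eq_length_filter]; exact h1)
    have hi_mem : i ∈ (List.range n).filter pNe := by rw [hfil]; simp
    have hi_lt : i < n := by simpa using (List.mem_filter.1 hi_mem).1
    refine ⟨i, hi_lt, ?_⟩
    intro j hj hji
    by_contra hne'
    have hj_mem : j ∈ (List.range n).filter pNe := by
      rw [List.mem_filter]
      refine ⟨by simpa using hj, ?_⟩
      simp only [hpNe, Bool.not_eq_true', hpEq, beq_eq_false_iff_ne]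
      exact hne'
    rw [hfil] at hj_mem
    simp only [List.mem_singleton] at hj_mem
    exact hji hj_mem
  · rintro ⟨i, hi, hagree⟩
    have htl : u.toList ≠ w.toList := fun hh => hne (by
      have := congrArg String.ofList hh
      simpa [String.ofList_toList] using this)
    have hdiff : ¬ pEq i = true := by
      intro hEq
      apply htl
      apply List.ext_getElem?
      intro j
      by_cases hj : j < n
      · by_cases hji : j = i
        · subst hji
          simpa [hpEq] using hEq
        · exact hagree j hj hji
      · rw [List.getElem?_eq_none (by omega), List.getElem?_eq_none (by omega)]
    have hfil : (List.range n).filter pNe = [i] := by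
      apply pv_singleton_of_nodup _ i (List.nodup_range.filter _)
      · rw [List.mem_filter]
        refine ⟨by simpa using hi, ?_⟩
        simp only [hpNe, Bool.not_eq_true', hpEq, beq_eq_false_iff_ne]
        simp only [hpEq, beq_iff_eq] at hdiff
        exact hdiff
      · intro x hx
        rcases List.mem_filter.1 hx with ⟨hxr, hxp⟩
        by_contra hxi
        have hxEq : pEq x = true := by
          have := hagree x (by simpa using hxr) hxi
          simp only [hpEq, beq_iff_eq]
          exact this
        simp [hpNe, hxEq] at hxp
    have hone : List.countP pNe (List.range n) = 1 := by
      rw [List.countP_eq_length_filter, hfil]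
      rfl
    omega

theorem pv_q_agree_aux (u w : String) (hl : u.toList.length = w.toList.length) :
    pvQA u w = pvQB u w := by
  cases huw : (u == w) with
  | true => simp [pvQA, pvQB, huw]
  | false =>
    have hne : u ≠ w := by simpa using huw
    simp only [pvQA, pvQB, huw, Bool.not_false, Bool.true_and]
    rw [Bool.eq_iff_iff, beq_iff_eq, List.any_eq_true, pv_checkdiff_one_iff u w hl hne]
    constructor
    · rintro ⟨i, hi, hagree⟩
      refine ⟨pvDelKey w (i : Int), ?_, ?_⟩
      · rw [pv_mem_pats]
        exact ⟨i, by omega, pv_delKey_natCast w i⟩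
      · rw [decide_eq_true_eq, pv_mem_pats, pv_delKey_natCast]
        refine ⟨i, by omega, ?_⟩
        have hdel : u.toList.take i ++ u.toList.drop (i+1) = w.toList.take i ++ w.toList.drop (i+1) :=
          (pv_del_eq_iff u.toList w.toList hl i (by omega)).2 hagree
        rw [Prod.mk.injEq]
        exact ⟨rfl, by rw [← hdel]⟩
    · rintro ⟨p, hpw, hpu⟩
      rw [decide_eq_true_eq] at hpu
      rcases (pv_mem_pats w p).1 hpw with ⟨i, hiw, rfl⟩
      rcases (pv_mem_pats u _).1 hpu with ⟨k, hku, hk⟩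
      have hik : i = k := by
        have := congrArg Prod.fst hk
        simpa using this
      subst hik
      have hdel : String.ofList (w.toList.take i ++ w.toList.drop (i+1))
          = String.ofList (u.toList.take i ++ u.toList.drop (i+1)) := congrArg Prod.snd hk
      have hdel' : u.toList.take i ++ u.toList.drop (i+1) = w.toList.take i ++ w.toList.drop (i+1) := by
        have := congrArg String.toList hdel
        simpa [String.toList_ofList] using this.symm
      exact ⟨i, by omega, (pv_del_eq_iff u.toList w.toList hl i (by omega)).1 hdel'⟩

-- ---- B side: characterizing the bucket/adjacency dictionaries ----

def pvPairs (words : List String) : List ((Int × String) × String) :=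
  words.flatMap (fun w => (pvPats w).map (fun p => (p, w)))

def pvBK (words : List String) (p : Int × String) : List String :=
  words.filter (fun w => decide (p ∈ pvPats w))

def pvMadj (words : List String) : List (String × String) :=
  words.flatMap (fun w => (pvPats w).flatMap (fun p =>
    ((PySem.Set.ofList (pvBK words p)).filter (fun x => !(x == w))).map (fun x => (x, w))))

theorem pv_getD_foldl_group {κ ν α : Type} [BEq κ] [LawfulBEq κ] [DecidableEq κ]
    (f : α → ν → ν) (d0 : ν) (c : κ) :
    ∀ (l : List (κ × α)) (d : PySem.Dict κ ν),
      (l.foldl (fun d q => d.insert q.1 (f q.2 (d.getD q.1 d0))) d).getD c d0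
      = ((l.filter (fun q => q.1 == c)).map Prod.snd).foldl (fun v a => f a v) (d.getD c d0) := by
  intro l
  induction l with
  | nil => intro d; rfl
  | cons q t ih =>
    intro d
    simp only [List.foldl_cons, List.filter_cons]
    rw [ih]
    by_cases hc : q.1 = c
    · rw [if_pos (by simp [hc]), List.map_cons, List.foldl_cons, PySem.Dict.getD_insert,
        if_pos hc.symm, hc]
    · rw [if_neg (by simp [hc]), PySem.Dict.getD_insert, if_neg (fun hcc => hc hcc.symm)]

theorem pv_groupdict_keys {κ : Type} [BEq κ] [LawfulBEq κ] [DecidableEq κ]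
    (l : List (κ × String)) (c : κ) :
    ((l.foldl (fun d q => d.insert q.1 ((d.getD q.1 PySem.Dict.empty).insert q.2 ()))
        PySem.Dict.empty).getD c PySem.Dict.empty).keys
    = PySem.Set.ofList ((l.filter (fun q => q.1 == c)).map Prod.snd) := by
  rw [pv_getD_foldl_group (fun (a : String) (v : PySem.Dict String Unit) => v.insert a ())
    PySem.Dict.empty c l PySem.Dict.empty]
  rw [PySem.Dict.getD_empty]
  rw [PySem.Dict.keys_foldl_insert _ (fun _ _ => ()) PySem.Dict.empty]
  rw [PySem.Dict.keys_empty, PySem.Set.ofList_eq_foldl]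
  rfl

theorem pv_groupdict_contains {κ : Type} [BEq κ] [LawfulBEq κ] [DecidableEq κ]
    (l : List (κ × String)) (c : κ) :
    ((l.foldl (fun d q => d.insert q.1 ((d.getD q.1 PySem.Dict.empty).insert q.2 ()))
        PySem.Dict.empty).contains c) = true ↔ c ∈ l.map Prod.fst := by
  rw [PySem.Dict.contains_iff_mem_keys]
  rw [PySem.Dict.keys_foldl_insert_key l Prod.fst
    (fun d q => ((d.getD q.1 PySem.Dict.empty).insert q.2 ())) PySem.Dict.empty]
  rw [PySem.Dict.keys_empty]
  rw [show PySem.Set.update ([] : PySem.Set κ) (l.map Prod.fst)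
      = PySem.Set.ofList (l.map Prod.fst) from (PySem.Set.ofList_eq_foldl _).symm]
  exact PySem.Set.mem_ofList _ c

theorem pv_mem_fst_iff_filter_ne {κ : Type} [BEq κ] [LawfulBEq κ] (l : List (κ × String)) (c : κ) :
    c ∈ l.map Prod.fst ↔ l.filter (fun q => q.1 == c) ≠ [] := by
  constructor
  · intro hm
    rcases List.mem_map.1 hm with ⟨q, hq, rfl⟩
    intro hnil
    have : q ∈ l.filter (fun q' => q'.1 == q.1) := List.mem_filter.2 ⟨hq, by simp⟩
    rw [hnil] at this
    cases this
  · intro hne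
    rcases List.exists_mem_of_ne_nil _ hne with ⟨q, hq⟩
    rcases List.mem_filter.1 hq with ⟨hql, hqc⟩
    exact List.mem_map.2 ⟨q, hql, eq_of_beq hqc⟩

theorem pv_bfold_eq (words : List String) :
    words.foldl (fun buckets w =>
      (PySem.List.pyRange 0 (PySem.Str.len w)).foldl (fun buckets i =>
        buckets.insert (pvDelKey w i)
          ((buckets.getD (pvDelKey w i) PySem.Dict.empty).insert w ())) buckets)
      PySem.Dict.empty
    = (pvPairs words).foldl
        (fun b q => b.insert q.1 ((b.getD q.1 PySem.Dict.empty).insert q.2 ()))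
        PySem.Dict.empty := by
  unfold pvPairs
  rw [List.foldl_flatMap]
  apply PySem.List.foldl_congr_mem
  intro acc w _
  unfold pvPats
  rw [List.map_map, List.foldl_map]
  rfl

theorem pv_per_word (w : String) (p : Int × String) :
    (((pvPats w).map (fun q => (q, w))).filter (fun q => q.1 == p)).map Prod.snd
      = if p ∈ pvPats w then [w] else [] := by
  rw [List.filter_map, List.map_map]
  rw [show ((fun (q : (Int × String) × String) => q.1 == p) ∘ (fun q => (q, w)))
      = fun q => q == p from rfl]
  rw [List.filter_beq]
  by_cases hm : p ∈ pvPats w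
  · rw [List.count_eq_one_of_mem (pv_nodup_pats w) hm]
    simp [hm]
  · rw [List.count_eq_zero_of_not_mem hm]
    simp [hm]

theorem pv_pairs_filter (words : List String) (p : Int × String) :
    ((pvPairs words).filter (fun q => q.1 == p)).map Prod.snd = pvBK words p := by
  induction words with
  | nil => rfl
  | cons w t ih =>
    simp only [pvPairs, List.flatMap_cons, List.filter_append, List.map_append] at *
    rw [ih, pv_per_word]
    simp only [pvBK, List.filter_cons]
    by_cases hm : p ∈ pvPats w
    · simp [hm]
    · simp [hm]

theorem pv_buckets_keys (words : List String) (p : Int × String) :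
    (((pvPairs words).foldl
        (fun b q => b.insert q.1 ((b.getD q.1 PySem.Dict.empty).insert q.2 ()))
        PySem.Dict.empty).getD p PySem.Dict.empty).keys
    = PySem.Set.ofList (pvBK words p) := by
  rw [pv_groupdict_keys, pv_pairs_filter]

theorem pv_adj_eq (words : List String) :
    words.foldl (fun adj w =>
      (PySem.List.pyRange 0 (PySem.Str.len w)).foldl (fun adj i =>
        (PySem.Set.ofList (pvBK words (pvDelKey w i))).foldl (fun adj u =>
          if u == w then adj
          else adj.insert u ((adj.getD u PySem.Dict.empty).insert w ())) adj) adj)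
      PySem.Dict.empty
    = (pvMadj words).foldl
        (fun d q => d.insert q.1 ((d.getD q.1 PySem.Dict.empty).insert q.2 ()))
        PySem.Dict.empty := by
  unfold pvMadj
  rw [List.foldl_flatMap]
  apply PySem.List.foldl_congr_mem
  intro acc w _
  rw [List.foldl_flatMap]
  conv_rhs => rw [show pvPats w = (PySem.List.pyRange 0 (PySem.Str.len w)).map (pvDelKey w) from rfl,
    List.foldl_map]
  apply PySem.List.foldl_congr_mem
  intro acc2 i _
  conv_rhs => rw [List.foldl_map]
  rw [← PySem.List.foldl_if_eq_foldl_filter (fun x => !(x == w))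
    (fun (acc : PySem.Dict String (PySem.Dict String Unit)) x =>
      acc.insert x ((acc.getD x PySem.Dict.empty).insert w ()))]
  apply PySem.List.foldl_congr_mem
  intro acc3 u _
  cases hu : (u == w) <;> simp

theorem pv_flatMap_push {α β γ : Type} (l : List α) (G : α → List β) (c : β → Bool) (m : β → γ) :
    ((l.flatMap G).filter c).map m = l.flatMap (fun a => ((G a).filter c).map m) := by
  induction l with
  | nil => rfl
  | cons a t ih => simp [List.flatMap_cons, List.filter_append, ih]

-- the contribution of one scanned word w to u's adjacency list
theorem pv_inner_w (words : List String)
    (hlen : ∀ u ∈ words, ∀ v ∈ words, PySem.Str.len u = PySem.Str.len v)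
    (u : String) (hu : u ∈ words) (w : String) (hw : w ∈ words) :
    ((pvPats w).flatMap (fun p =>
        ((((PySem.Set.ofList (pvBK words p)).filter (fun x => !(x == w))).map
          (fun x => (x, w))).filter (fun q => q.1 == u)).map Prod.snd))
      = if pvQB u w then [w] else [] := by
  have hl : u.toList.length = w.toList.length := by
    have := hlen u hu w hw
    rw [PySem.Str.len_eq, PySem.Str.len_eq] at this
    exact_mod_cast this
  have hinner : ∀ p : Int × String,
      ((((PySem.Set.ofList (pvBK words p)).filter (fun x => !(x == w))).map
        (fun x => (x, w))).filter (fun q => q.1 == u)).map Prod.snd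
      = if (!(u == w) && decide (p ∈ pvPats u)) then [u].map (fun _ => w) else [] := by
    intro p
    rw [List.filter_map, List.map_map]
    rw [show ((fun (q : String × String) => q.1 == u) ∘ (fun x => (x, w)))
        = fun x => x == u from rfl]
    rw [List.filter_filter]
    cases huw : (u == w) with
    | true =>
      have huw' : u = w := eq_of_beq huw
      have : ((PySem.Set.ofList (pvBK words p)).filter (fun a => a == u && !(a == w))) = [] := by
        rw [List.filter_eq_nil_iff]
        intro a _
        by_cases hau : a = u
        · simp [hau, huw']
        · simp [hau]
      rw [this]
      simp
    | false =>
      have hcong : ((PySem.Set.ofList (pvBK words p)).filter (fun a => a == u && !(a == w)))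
          = ((PySem.Set.ofList (pvBK words p)).filter (fun a => a == u)) := by
        apply List.filter_congr
        intro a _
        by_cases hau : a = u
        · simp [hau, huw]
        · simp [hau]
      rw [hcong, List.filter_beq]
      by_cases hmem : u ∈ PySem.Set.ofList (pvBK words p)
      · rw [List.count_eq_one_of_mem (PySem.Set.nodup_ofList _) hmem]
        have : decide (p ∈ pvPats u) = true := by
          have hmm := (PySem.Set.mem_ofList _ u).1 hmem
          unfold pvBK at hmm
          exact (List.mem_filter.1 hmm).2
        simp [this]
      · rw [List.count_eq_zero_of_not_mem hmem]
        have : decide (p ∈ pvPats u) = false := by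
          rw [decide_eq_false_iff_not]
          intro hp
          exact hmem ((PySem.Set.mem_ofList _ u).2
            (List.mem_filter.2 ⟨hu, by simp [hp]⟩))
        simp [this]
  calc (pvPats w).flatMap (fun p =>
        ((((PySem.Set.ofList (pvBK words p)).filter (fun x => !(x == w))).map
          (fun x => (x, w))).filter (fun q => q.1 == u)).map Prod.snd)
      = (pvPats w).flatMap (fun p =>
          if (!(u == w) && decide (p ∈ pvPats u)) then [w] else []) := by
        apply List.flatMap_congr
        intro p _
        rw [hinner p]
        cases h : (!(u == w) && decide (p ∈ pvPats u)) <;> simp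
    _ = if (pvPats w).any (fun p => !(u == w) && decide (p ∈ pvPats u)) then [w] else [] := by
        apply pv_flatMap_if_unique _ _ _ (pv_nodup_pats w)
        intro p hp p' hp' hcp hcp'
        rcases Bool.and_eq_true_iff.1 hcp with ⟨huw, hpu⟩
        rcases Bool.and_eq_true_iff.1 hcp' with ⟨_, hpu'⟩
        have hne : u ≠ w := by simpa using huw
        rw [decide_eq_true_eq] at hpu hpu'
        rcases (pv_mem_pats w p).1 hp with ⟨i, hiw, rfl⟩
        rcases (pv_mem_pats w p').1 hp' with ⟨i', hiw', rfl⟩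
        rcases (pv_mem_pats u _).1 hpu with ⟨k, hku, hk⟩
        rcases (pv_mem_pats u _).1 hpu' with ⟨k', hku', hk'⟩
        have hik : i = k := by
          have h1 : ((i : Int)) = (k : Int) := congrArg Prod.fst hk
          exact_mod_cast h1
        have hik' : i' = k' := by
          have h1 : ((i' : Int)) = (k' : Int) := congrArg Prod.fst hk'
          exact_mod_cast h1
        subst hik hik'
        have hdel : u.toList.take i ++ u.toList.drop (i+1)
            = w.toList.take i ++ w.toList.drop (i+1) := by
          have := congrArg (fun s => String.toList s.2) hk
          simpa [String.toList_ofList] using this.symm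
        have hdel' : u.toList.take i' ++ u.toList.drop (i'+1)
            = w.toList.take i' ++ w.toList.drop (i'+1) := by
          have := congrArg (fun s => String.toList s.2) hk'
          simpa [String.toList_ofList] using this.symm
        by_cases hii : i = i'
        · subst hii; rfl
        · exfalso
          apply hne
          have hagree := (pv_del_eq_iff u.toList w.toList hl i (by omega)).1 hdel
          have hagree' := (pv_del_eq_iff u.toList w.toList hl i' (by omega)).1 hdel'
          have := pv_agree_two u.toList w.toList hl i i' hii hagree hagree'
          have h2 := congrArg String.ofList this
          simpa [String.ofList_toList] using h2
    _ = if pvQB u w then [w] else [] := by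
        unfold pvQB
        cases huw : (u == w) with
        | true => simp
        | false => simp only [Bool.not_false, Bool.true_and]

theorem pv_wsu (words : List String)
    (hlen : ∀ u ∈ words, ∀ v ∈ words, PySem.Str.len u = PySem.Str.len v)
    (u : String) (hu : u ∈ words) :
    ((pvMadj words).filter (fun q => q.1 == u)).map Prod.snd = words.filter (pvQB u) := by
  unfold pvMadj
  rw [pv_flatMap_push]
  rw [← pv_flatMap_ite_singleton (pvQB u) words]
  apply List.flatMap_congr
  intro w hw
  rw [pv_flatMap_push]
  exact pv_inner_w words hlen u hu w hw

theorem pv_B_eq_canon (words : List String)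
    (hlen : ∀ u ∈ words, ∀ v ∈ words, PySem.Str.len u = PySem.Str.len v) :
    groupSetByRule_alt words = (pvCanon (fun u => words.filter (pvQB u)) words).items := by
  unfold groupSetByRule_alt pvCanon
  dsimp only
  simp only [pv_bfold_eq, pv_buckets_keys, pv_adj_eq]
  congr 1
  apply pv_foldl_inv_congr (pvP (fun u => words.filter (pvQB u)))
  · exact ⟨by simp [PySem.Dict.keys_empty], fun u s h => by simp [PySem.Dict.get?_empty] at h⟩
  · intro g w hw hP
    have hws := pv_wsu words hlen w hw
    by_cases hnb : words.filter (pvQB w) = []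
    · have hcont : ((pvMadj words).foldl
          (fun d q => d.insert q.1 ((d.getD q.1 PySem.Dict.empty).insert q.2 ()))
          PySem.Dict.empty).contains w = false := by
        rw [Bool.eq_false_iff]
        intro hc
        have hmem := (pv_groupdict_contains (pvMadj words) w).1 hc
        have hne := (pv_mem_fst_iff_filter_ne (pvMadj words) w).1 hmem
        apply hne
        have hmn : ((pvMadj words).filter (fun q => q.1 == w)).map Prod.snd = [] := by
          rw [hws, hnb]
        exact List.map_eq_nil_iff.1 hmn
      rw [hcont, if_pos hnb]
      simp
    · have hcont : ((pvMadj words).foldl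
          (fun d q => d.insert q.1 ((d.getD q.1 PySem.Dict.empty).insert q.2 ()))
          PySem.Dict.empty).contains w = true := by
        rw [pv_groupdict_contains, pv_mem_fst_iff_filter_ne]
        intro hfil
        apply hnb
        rw [← hws, hfil]
        rfl
      rw [hcont, if_neg hnb, pv_groupdict_keys, hws,
        pv_ofList_nodup _ (PySem.Set.nodup_ofList _)]
      cases hgw : g.contains w with
      | false => simp
      | true =>
        have hsome := PySem.Dict.contains_eq_isSome_get? g w
        rw [hgw] at hsome
        obtain ⟨s, hs⟩ := Option.isSome_iff_exists.1 hsome.symm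
        have hv : s = PySem.Set.ofList (words.filter (pvQB w)) := hP.2 w s hs
        simp only [Bool.not_true, Bool.and_false, Bool.false_eq_true, reduceIte]
        rw [← pv_insert_eq_self g w s hP.1 hs, hv, PySem.Dict.insert_insert_self]
  · intro g w _ hP
    exact pv_canonstep_preserves _ g w hP

theorem pv_q_agree (words : List String)
    (hlen : ∀ u ∈ words, ∀ v ∈ words, PySem.Str.len u = PySem.Str.len v)
    (u : String) (hu : u ∈ words) (w : String) (hw : w ∈ words) :
    pvQA u w = pvQB u w := by
  apply pv_q_agree_aux
  have := hlen u hu w hw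
  rw [PySem.Str.len_eq, PySem.Str.len_eq] at this
  exact_mod_cast this

-- ===== VERDICT (by name: the statement is the Claim_ definition above) =====
theorem groupSetByRule_spec : Claim_equal_groupSetByRule := by
  intro words _ hpre
  unfold Spec_groupSetByRule
  rw [pv_A_eq_canon, pv_B_eq_canon words hpre]
  unfold pvCanon
  congr 1
  refine PySem.List.foldl_congr_mem _ _ _ _ ?_
  intro acc u hu
  simp only [List.filter_congr (fun w hw => pv_q_agree words hpre u hu w hw)]
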